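-- pv_equiv track=rewrite | github.com/GillesArcas/Advent_of_Code | 2022/19.py | filter_on_robots
-- ===== SOURCE A (Python) =====
-- from collections import defaultdict
--
-- def filter_on_robots(states):
--     sets = defaultdict(set)
--     for robots, collected in states:
--         sets[collected].add(robots)
--
--     newstates = set()
--     for collected, set1 in sets.items():
--         ordered_robots = list(sorted(set1))
--         newset = set()
--         for index, robots in enumerate(ordered_robots):
--             for robots2 in ordered_robots[index + 1:]:
--                 if all(robot1 <= robot2 for robot1, robot2 in zip(robots, robots2)):
--                     break
--             else:
--                 newstates.add((robots, collected))
--                 newset.add(robots)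
--
--     return newstates
-- ===== SOURCE B (Python) =====
-- def filter_on_robots(states):
--     groups = {}
--     for robots, collected in states:
--         groups.setdefault(collected, set()).add(robots)
--
--     newstates = set()
--     for collected, group in groups.items():
--         survivors = group
--         for y in group:
--             survivors = {x for x in survivors
--                          if not (x < y and all(a <= b for a, b in zip(x, y)))}
--         for robots in sorted(survivors):
--             newstates.add((robots, collected))
--     return newstates
-- ===== Notes on version B (the rewrite author's own statement) =====
-- stated objective: alternative
-- what changed: Per collected-group, B drops A's index-based scan of each tuple's successors in the sorted order (enumerate, slice, for-else break) and instead runs an order-free elimination pass: every group member is used once to filter out all tuples it strictly dominates (strictly lex-greater and componentwise >=), and only the surviving maxima are sorted for output; grouping uses dict.setdefault instead of defaultdict.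
import Mathlib
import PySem

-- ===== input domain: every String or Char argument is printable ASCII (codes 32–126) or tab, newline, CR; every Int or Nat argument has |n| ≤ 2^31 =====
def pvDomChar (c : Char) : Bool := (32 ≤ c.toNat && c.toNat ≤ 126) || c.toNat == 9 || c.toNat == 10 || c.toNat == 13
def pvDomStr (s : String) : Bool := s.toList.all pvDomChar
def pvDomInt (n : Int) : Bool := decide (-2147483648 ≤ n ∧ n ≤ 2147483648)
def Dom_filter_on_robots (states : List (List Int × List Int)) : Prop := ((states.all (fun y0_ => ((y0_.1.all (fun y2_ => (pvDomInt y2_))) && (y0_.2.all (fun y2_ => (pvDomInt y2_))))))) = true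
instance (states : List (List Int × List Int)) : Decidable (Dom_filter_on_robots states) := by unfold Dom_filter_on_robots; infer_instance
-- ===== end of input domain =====

-- B replaces A's positional scan of each tuple's successors in the per-group sorted list
-- (enumerate / slice / for-else) by an order-free elimination pass — every group member is
-- used once to filter out the tuples it strictly dominates, and only the survivors are
-- sorted (objective: alternative; same return value on every input).

-- ===== PORT A =====
-- shared comparator: 'all(robot1 <= robot2 for robot1, robot2 in zip(r, r2))'
-- (both Pythons contain this expression verbatim)
def pvZipLe (x y : List Int) : Bool := (x.zip y).all (fun ab => decide (ab.1 ≤ ab.2))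

-- literal port of A; the local 'newset' of A is dead (written, never read) and is omitted;
-- the inner 'for … break / else' computes exactly '.any' of the dominator test
def filter_on_robots (states : List (List Int × List Int)) : List (List Int × List Int) :=
  let sets : PySem.Dict (List Int) (PySem.Set (List Int)) :=
    states.foldl (fun d p => d.modify p.2 PySem.Set.empty (fun s => PySem.Set.add s p.1)) PySem.Dict.empty
  sets.items.foldl (fun newstates cg =>
    let ordered := PySem.List.sorted cg.2 (fun x => x)
    (PySem.List.enumerate ordered).foldl (fun ns ir =>
      if (PySem.List.slice ordered (some (ir.1 + 1)) none).any (fun r2 => pvZipLe ir.2 r2)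
      then ns
      else PySem.Set.add ns (ir.2, cg.1)) newstates) PySem.Set.empty

-- ===== PORT B =====
-- literal port of Source B: groups via setdefault + in-place add, then per group an
-- elimination fold (the set comprehension over the set 'survivors' is its filter — exact
-- as a set, and the result is only consumed by sorted(), so no hash order is observed)
def filter_on_robots_alt (states : List (List Int × List Int)) : List (List Int × List Int) :=
  let groups : PySem.Dict (List Int) (PySem.Set (List Int)) :=
    states.foldl (fun d p =>
      let d' := d.setdefault p.2 PySem.Set.empty
      d'.insert p.2 (PySem.Set.add (d'.getD p.2 PySem.Set.empty) p.1)) PySem.Dict.empty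
  groups.items.foldl (fun ns cg =>
    let survivors := cg.2.foldl (fun s y => s.filter (fun x => !(decide (x < y) && pvZipLe x y))) cg.2
    (PySem.List.sorted survivors (fun x => x)).foldl (fun ns2 r => PySem.Set.add ns2 (r, cg.1)) ns) PySem.Set.empty

-- ===== PRECONDITION & SPEC =====
def Spec_filter_on_robots (states : List (List Int × List Int)) (out : List (List Int × List Int)) : Prop := out = filter_on_robots_alt states
instance (states : List (List Int × List Int)) (out : List (List Int × List Int)) : Decidable (Spec_filter_on_robots states out) := by unfold Spec_filter_on_robots; infer_instance

-- ===== CLAIM (what is proved, stated in full; the proofs are below) =====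
def Claim_equal_filter_on_robots : Prop := ∀ (states : List (List Int × List Int)), Dom_filter_on_robots states → Spec_filter_on_robots states (filter_on_robots states)

-- ===== LEMMAS AND PROOFS =====

-- B's grouping step (setdefault + in-place add) equals A's (defaultdict modify)
theorem pvStep_eq (d : PySem.Dict (List Int) (PySem.Set (List Int))) (p : List Int × List Int) :
    ((d.setdefault p.2 PySem.Set.empty).insert p.2
      (PySem.Set.add ((d.setdefault p.2 PySem.Set.empty).getD p.2 PySem.Set.empty) p.1))
    = d.modify p.2 PySem.Set.empty (fun s => PySem.Set.add s p.1) := by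
  rw [PySem.Dict.getD_setdefault_self]
  by_cases h : d.contains p.2 = true
  · rw [PySem.Dict.setdefault_of_contains d _ h]; rfl
  · rw [PySem.Dict.setdefault_of_not_contains d _ (by simpa using h),
        PySem.Dict.insert_insert_self]; rfl

-- value of the grouping fold at a key
theorem pvGroups_getD (l : List (List Int × List Int)) :
    ∀ (d : PySem.Dict (List Int) (PySem.Set (List Int))) (c : List Int),
    (l.foldl (fun d p => d.modify p.2 PySem.Set.empty (fun s => PySem.Set.add s p.1)) d).getD c PySem.Set.empty
    = PySem.Set.update (d.getD c PySem.Set.empty) ((l.filter (fun p => p.2 == c)).map (·.1)) := by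
  induction l with
  | nil => intro d c; simp [PySem.Set.update_nil]
  | cons p rest ih =>
    intro d c
    rw [List.foldl_cons, ih]
    by_cases h : p.2 = c
    · subst h
      simp [PySem.Set.update_cons]
    · have hb : (p.2 == c) = false := by simpa using h
      simp [PySem.Dict.getD_modify, hb, Ne.symm h]

-- A's inner loop, as structural recursion over suffixes
def pvTailScan (c : List Int) : List (List Int) → PySem.Set (List Int × List Int) → PySem.Set (List Int × List Int)
  | [], ns => ns
  | x :: rest, ns =>
      pvTailScan c rest (if rest.any (fun r2 => pvZipLe x r2) then ns else PySem.Set.add ns (x, c))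

-- the enumerate/slice fold of A is pvTailScan
theorem pvEnumFold (c : List Int) (L : List (List Int)) :
    ∀ (suf : List (List Int)) (n : Nat), L.drop n = suf → ∀ ns,
    (PySem.List.enumerate suf (n : Int)).foldl (fun ns ir =>
        if (PySem.List.slice L (some (ir.1 + 1)) none).any (fun r2 => pvZipLe ir.2 r2)
        then ns else PySem.Set.add ns (ir.2, c)) ns
    = pvTailScan c suf ns := by
  intro suf
  induction suf with
  | nil => intro n _ ns; simp [PySem.List.enumerate_nil, pvTailScan]
  | cons x rest ih =>
    intro n hdrop ns
    rw [PySem.List.enumerate_cons, List.foldl_cons]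
    have hs : PySem.List.slice L (some ((n : Int) + 1)) none = rest := by
      have : ((n : Int) + 1) = ((n + 1 : Nat) : Int) := by push_cast; ring
      rw [this, PySem.List.slice_from_natCast, ← List.tail_drop, hdrop]; rfl
    have hd2 : L.drop (n + 1) = rest := by rw [← List.tail_drop, hdrop]; rfl
    have hcast : ((n : Int) + 1) = ((n + 1 : Nat) : Int) := by push_cast; ring
    rw [hs]
    rw [hcast, ih (n + 1) hd2]
    rfl

-- on a strictly increasing list, "some later element dominates x" = "some strictly
-- lex-greater element of the list dominates x"
theorem pvTailScan_eq_filter (c : List Int) :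
    ∀ (L : List (List Int)), L.Pairwise (· < ·) → ∀ ns,
    pvTailScan c L ns
    = (L.filter (fun x => !(L.any (fun y => decide (x < y) && pvZipLe x y)))).foldl
        (fun a r => PySem.Set.add a (r, c)) ns := by
  intro L
  induction L with
  | nil => intro _ ns; simp [pvTailScan]
  | cons x rest ih =>
    intro hp ns
    have hx : ∀ z ∈ rest, x < z := fun z hz => (List.pairwise_cons.mp hp).1 z hz
    have hrest := (List.pairwise_cons.mp hp).2
    have hhead : ((x :: rest).any (fun y => decide (x < y) && pvZipLe x y))
        = rest.any (fun r2 => pvZipLe x r2) := by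
      rw [List.any_cons]
      have : decide (x < x) = false := by simp
      rw [this, Bool.false_and, Bool.false_or]
      exact PySem.List.any_congr_mem (fun y hy => by simp [hx y hy])
    have htail : rest.filter (fun z => !((x :: rest).any (fun y => decide (z < y) && pvZipLe z y)))
        = rest.filter (fun z => !(rest.any (fun y => decide (z < y) && pvZipLe z y))) := by
      refine List.filter_congr fun z hz => ?_
      have : decide (z < x) = false := by simp [lt_asymm (hx z hz)]
      rw [List.any_cons, this, Bool.false_and, Bool.false_or]
    show pvTailScan c rest _ = _
    rw [List.filter_cons, hhead]
    by_cases hany : rest.any (fun r2 => pvZipLe x r2) = true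
    · rw [if_pos hany, ih hrest, htail]
      simp [hany]
    · have hf : rest.any (fun r2 => pvZipLe x r2) = false := by simpa using hany
      rw [if_neg (by simp [hf]), ih hrest, htail]
      simp [hf]

-- a fold of filters is one filter
theorem pvFoldFilter (p : List Int → List Int → Bool) :
    ∀ (l : List (List Int)) (s0 : List (List Int)),
    l.foldl (fun s y => s.filter (fun x => p x y)) s0
    = s0.filter (fun x => l.all (fun y => p x y)) := by
  intro l
  induction l with
  | nil => intro s0; simp
  | cons y rest ih =>
    intro s0
    rw [List.foldl_cons, ih, List.filter_filter]
    exact List.filter_congr (by intro x _; simp [Bool.and_comm])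

-- bridge between the DecidableLT instance elaborated in the ports and the one of the
-- LinearOrder (List Int) instance the PySem order lemmas are stated with
theorem pvSortedInst (ys : List (List Int)) :
    PySem.List.sorted ys (fun x : List Int => x) false
    = @PySem.List.sorted _ _ _ (@LinearOrder.toDecidableLT _ inferInstance) ys (fun x => x) false := by
  congr 1

-- per-group bodies of the two outer folds agree when the group is a set-of-a-list
theorem pvInner (c : List Int) (xs : List (List Int)) (ns : PySem.Set (List Int × List Int)) :
    (PySem.List.enumerate (PySem.List.sorted (PySem.Set.ofList xs) (fun x => x))).foldl (fun ns ir =>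
        if (PySem.List.slice (PySem.List.sorted (PySem.Set.ofList xs) (fun x => x)) (some (ir.1 + 1)) none).any
            (fun r2 => pvZipLe ir.2 r2)
        then ns else PySem.Set.add ns (ir.2, c)) ns
    = (PySem.List.sorted ((PySem.Set.ofList xs).foldl
          (fun s y => s.filter (fun x => !(decide (x < y) && pvZipLe x y))) (PySem.Set.ofList xs)) (fun x => x)).foldl
        (fun ns2 r => PySem.Set.add ns2 (r, c)) ns := by
  set G := PySem.Set.ofList xs with hG
  set L := PySem.List.sorted G (fun x => x) with hL
  have hlt : L.Pairwise (· < ·) := by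
    rw [hL, pvSortedInst]
    exact PySem.List.sorted_ofList_pairwise_lt xs
  have h0 : ((0 : Nat) : Int) = (0 : Int) := by simp
  have hleft := pvEnumFold c L L 0 (by simp) ns
  rw [h0] at hleft
  rw [hleft, pvTailScan_eq_filter c L hlt ns]
  rw [pvFoldFilter (fun x y => !(decide (x < y) && pvZipLe x y)) G G]
  have hpred : ∀ z : List Int, (G.all (fun y => !(decide (z < y) && pvZipLe z y)))
      = !(G.any (fun y => decide (z < y) && pvZipLe z y)) :=
    fun z => (List.not_any_eq_all_not).symm
  have hperm : ((L.filter (fun z => G.all (fun y => !(decide (z < y) && pvZipLe z y)))).Perm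
      (G.filter (fun z => G.all (fun y => !(decide (z < y) && pvZipLe z y))))) :=
    (PySem.List.sorted_perm G (fun x => x) false).filter _
  have hcomm : PySem.List.sorted (G.filter (fun z => G.all (fun y => !(decide (z < y) && pvZipLe z y)))) (fun x => x)
      = L.filter (fun z => G.all (fun y => !(decide (z < y) && pvZipLe z y))) := by
    rw [pvSortedInst]
    exact PySem.List.sorted_eq_of_perm_of_pairwise_lt _ _ _ hperm
      (List.Pairwise.sublist List.filter_sublist hlt)
  rw [hcomm]
  refine congrArg (fun l => List.foldl _ ns l) ?_
  refine List.filter_congr fun z _ => ?_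
  rw [hpred z]
  have hpg : L.Perm G := PySem.List.sorted_perm G (fun x => x) false
  rw [hpg.any_eq]

-- ===== VERDICT (by name: the statement is the Claim_ definition above) =====
theorem filter_on_robots_spec : Claim_equal_filter_on_robots := by
  intro states _
  unfold Spec_filter_on_robots filter_on_robots filter_on_robots_alt
  have hdict : states.foldl (fun d (p : List Int × List Int) =>
        let d' := d.setdefault p.2 PySem.Set.empty
        d'.insert p.2 (PySem.Set.add (d'.getD p.2 PySem.Set.empty) p.1)) PySem.Dict.empty
      = states.foldl (fun d p => d.modify p.2 PySem.Set.empty (fun s => PySem.Set.add s p.1)) PySem.Dict.empty :=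
    PySem.List.foldl_congr_mem states _ _ _ (fun acc p _ => pvStep_eq acc p)
  rw [hdict]
  set sets := states.foldl (fun d (p : List Int × List Int) => d.modify p.2 PySem.Set.empty (fun s => PySem.Set.add s p.1)) PySem.Dict.empty with hsets
  have hnodup : sets.keys.Nodup :=
    PySem.Dict.nodup_keys_foldl_modify_key states Prod.snd PySem.Set.empty
      (fun _ p s => PySem.Set.add s p.1) PySem.Dict.empty PySem.Dict.nodup_keys_empty
  refine PySem.List.foldl_congr_mem _ _ _ _ ?_
  intro acc cg hcg
  obtain ⟨c, G⟩ := cg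
  have hG : G = PySem.Set.ofList ((states.filter (fun p => p.2 == c)).map (·.1)) := by
    have h1 := PySem.Dict.getD_of_mem_items sets hcg hnodup PySem.Set.empty
    rw [hsets, pvGroups_getD] at h1
    rw [← h1]
    exact PySem.Set.update_empty _
  show (PySem.List.enumerate (PySem.List.sorted G (fun x => x))).foldl _ acc = _
  rw [hG]
  exact pvInner c _ acc
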